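-- pv_equiv track=rewrite | github.com/bgunlp/qpl | finetuning/validate_qpl.py | eq_aggregated_cols
-- ===== SOURCE A (Python) =====
-- def eq_aggregated_cols(s1, s2):
--     "Determines whether two aggregated column names are equivalent - based on prefix only - case insensitive"
--     prefixes = ["count_", "min_", "max_", "avg_", "sum_"]
--     s1_lower = s1.lower()
--     s2_lower = s2.lower()
--     for prefix in prefixes:
--         if s1_lower.startswith(prefix) and s2_lower.startswith(prefix):
--             return True
--     return s1_lower == s2_lower
-- ===== SOURCE B (Python) =====
-- _PREFIXES = ["count_", "min_", "max_", "avg_", "sum_"]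
--
-- def _agg_category(s_lower):
--     "The aggregation prefix s_lower carries, or None."
--     return next((p for p in _PREFIXES if s_lower.startswith(p)), None)
--
-- def eq_aggregated_cols(s1, s2):
--     "Determines whether two aggregated column names are equivalent - based on prefix only - case insensitive"
--     c1 = _agg_category(s1.lower())
--     c2 = _agg_category(s2.lower())
--     return (c1 is not None and c1 == c2) or s1.lower() == s2.lower()
-- ===== Notes on version B (the rewrite author's own statement) =====
-- stated objective: alternative
-- what changed: Replaces the joint loop over prefixes with two independent category extractions (first prefix each lowercased string starts with, via next/generator) followed by a None-guarded category comparison, keeping the case-insensitive equality fallback.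
import Mathlib
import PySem

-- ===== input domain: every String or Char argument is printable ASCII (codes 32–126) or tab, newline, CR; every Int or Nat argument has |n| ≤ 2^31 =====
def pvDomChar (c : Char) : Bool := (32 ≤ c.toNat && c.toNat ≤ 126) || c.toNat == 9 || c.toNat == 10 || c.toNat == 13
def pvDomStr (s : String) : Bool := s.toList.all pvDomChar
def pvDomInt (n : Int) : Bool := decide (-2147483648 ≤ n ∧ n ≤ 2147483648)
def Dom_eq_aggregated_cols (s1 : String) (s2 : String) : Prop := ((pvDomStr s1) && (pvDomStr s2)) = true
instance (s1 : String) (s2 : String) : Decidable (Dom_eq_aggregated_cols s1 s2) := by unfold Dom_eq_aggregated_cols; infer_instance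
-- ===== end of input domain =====

-- B replaces A's joint loop over the prefixes by two independent category extractions
-- (first prefix the lowercased string starts with) compared with a None guard; same cost.

-- ===== PORT A =====
-- the loop 'for prefix in prefixes: if … return True' then 'return s1_lower == s2_lower'
def pvGoA (l1 l2 : String) : List String → Bool
  | [] => l1 == l2
  | p :: ps =>
      if PySem.Str.startswith l1 p && PySem.Str.startswith l2 p then true
      else pvGoA l1 l2 ps

def eq_aggregated_cols (s1 : String) (s2 : String) : Bool :=
  let prefixes : List String := ["count_", "min_", "max_", "avg_", "sum_"]
  let s1_lower := PySem.Str.lower s1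
  let s2_lower := PySem.Str.lower s2
  pvGoA s1_lower s2_lower prefixes

-- ===== PORT B =====
def pvPrefixesB : List String := ["count_", "min_", "max_", "avg_", "sum_"]

-- next((p for p in _PREFIXES if s_lower.startswith(p)), None)
def pvAggCategory (s_lower : String) : Option String :=
  pvPrefixesB.find? (fun p => PySem.Str.startswith s_lower p)

def eq_aggregated_cols_alt (s1 : String) (s2 : String) : Bool :=
  let c1 := pvAggCategory (PySem.Str.lower s1)
  let c2 := pvAggCategory (PySem.Str.lower s2)
  (c1.isSome && c1 == c2) || (PySem.Str.lower s1 == PySem.Str.lower s2)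

-- ===== PRECONDITION & SPEC =====
def Spec_eq_aggregated_cols (s1 : String) (s2 : String) (out : Bool) : Prop := out = eq_aggregated_cols_alt s1 s2
instance (s1 : String) (s2 : String) (out : Bool) : Decidable (Spec_eq_aggregated_cols s1 s2 out) := by unfold Spec_eq_aggregated_cols; infer_instance

-- ===== CLAIM (what is proved, stated in full; the proofs are below) =====
def Claim_equal_eq_aggregated_cols : Prop := ∀ (s1 : String) (s2 : String), Dom_eq_aggregated_cols s1 s2 → Spec_eq_aggregated_cols s1 s2 (eq_aggregated_cols s1 s2)

-- ===== LEMMAS AND PROOFS =====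

-- A's loop returns true iff some prefix matches both strings, else falls through to equality.
theorem pvGoA_eq_any (l1 l2 : String) (ps : List String) :
    pvGoA l1 l2 ps
      = ((ps.any fun p => PySem.Str.startswith l1 p && PySem.Str.startswith l2 p) || (l1 == l2)) := by
  induction ps with
  | nil => simp [pvGoA]
  | cons p ps ih =>
      by_cases h : (PySem.Chars.startswith l1.toList p.toList && PySem.Chars.startswith l2.toList p.toList) = true
      · simp [pvGoA, h]
      · simp only [Bool.not_eq_true] at h
        simp [pvGoA, h, ih]

-- the five prefixes are pairwise incompatible: a single string starts with at most one of them
theorem pvExcl (l : String) (p q : String) (hp : p ∈ pvPrefixesB) (hq : q ∈ pvPrefixesB)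
    (h1 : PySem.Str.startswith l p = true) (h2 : PySem.Str.startswith l q = true) : p = q := by
  rw [PySem.Str.startswith_eq, PySem.Chars.startswith_iff] at h1 h2
  have htot := List.prefix_or_prefix_of_prefix h1 h2
  fin_cases hp <;> fin_cases hq <;> first
    | rfl
    | exact absurd htot (by decide)

theorem pvAny_eq_cat (l1 l2 : String) :
    (pvPrefixesB.any fun p => PySem.Str.startswith l1 p && PySem.Str.startswith l2 p)
      = ((pvAggCategory l1).isSome && (pvAggCategory l1 == pvAggCategory l2)) := by
  cases h1 : pvAggCategory l1 with
  | none =>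
      have hall := List.find?_eq_none.mp h1
      simp only [PySem.Str.startswith_eq] at hall
      simp only [Option.isSome_none, Bool.false_and]
      rw [List.any_eq_false]
      intro p hp
      simp [hall p hp]
  | some p =>
      have hmem := List.mem_of_find?_eq_some h1
      have hsw1 : PySem.Str.startswith l1 p = true := List.find?_some h1
      simp only [Option.isSome_some, Bool.true_and]
      cases h2 : pvAggCategory l2 with
      | none =>
          have hall := List.find?_eq_none.mp h2
          simp only [PySem.Str.startswith_eq] at hall
          have hb : (some p == (none : Option String)) = false := rfl
          rw [hb, List.any_eq_false]
          intro q hq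
          simp [hall q hq]
      | some q =>
          have hmemq := List.mem_of_find?_eq_some h2
          have hsw2 : PySem.Str.startswith l2 q = true := List.find?_some h2
          by_cases hpq : p = q
          · subst hpq
            have hb : (some p == some p) = true := by simp
            rw [hb, List.any_eq_true]
            refine ⟨p, hmem, ?_⟩
            simp only [PySem.Str.startswith_eq] at hsw1 hsw2
            simp [hsw1, hsw2]
          · have hb : (some p == some q) = false := by simp [hpq]
            rw [hb, List.any_eq_false]
            intro r hr
            simp only [PySem.Str.startswith_eq, Bool.and_eq_true, not_and, Bool.not_eq_true]
            intro hr1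
            rw [← PySem.Str.startswith_eq] at hr1
            by_contra hr2
            simp only [Bool.not_eq_false, ← PySem.Str.startswith_eq] at hr2
            have hrp := pvExcl l1 p r hmem hr hsw1 hr1
            have hrq := pvExcl l2 q r hmemq hr hsw2 hr2
            exact hpq (hrp.trans hrq.symm)

-- ===== VERDICT (by name: the statement is the Claim_ definition above) =====
theorem eq_aggregated_cols_spec : Claim_equal_eq_aggregated_cols := by
  intro s1 s2 _
  show eq_aggregated_cols s1 s2 = eq_aggregated_cols_alt s1 s2
  unfold eq_aggregated_cols eq_aggregated_cols_alt
  simp only []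
  rw [pvGoA_eq_any]
  have := pvAny_eq_cat (PySem.Str.lower s1) (PySem.Str.lower s2)
  simp only [pvPrefixesB] at this
  rw [this]
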